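-- pv_equiv track=rewrite | github.com/hfabris/AoC | AoC2019/day4.py | part_two_check_num
-- ===== SOURCE A (Python) =====
-- def part_two_check_num(number):
--     adjacent = False
--     i = 0
--     while True:
--         if( i >= 5): return adjacent
--         if( number[i] > number[i+1]): return False
--         count = 0
--         while(i < 5 and number[i] == number[i+1]):
--             count += 1
--             i += 1
--         if( count == 1): adjacent = True
--         if( count == 0): i += 1
-- ===== SOURCE B (Python) =====
-- def part_two_check_num(number):
--     digits = number[:6]
--     runs = []
--     for d in digits:
--         if runs and runs[-1][0] == d:
--             runs[-1][1] += 1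
--         else:
--             runs.append([d, 1])
--     return all(x <= y for x, y in zip(digits, digits[1:])) and any(c == 2 for _, c in runs)
-- ===== Notes on version B (the rewrite author's own statement) =====
-- stated objective: idiomatic
-- what changed: A's fused while-loop state machine (index juggling with an in-place equal-run counter) is replaced by a run-length-encoding pass over the first six digits followed by two separate scans: an adjacent-pairs non-decreasing check and an 'some run has length exactly 2' check.
import Mathlib
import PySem

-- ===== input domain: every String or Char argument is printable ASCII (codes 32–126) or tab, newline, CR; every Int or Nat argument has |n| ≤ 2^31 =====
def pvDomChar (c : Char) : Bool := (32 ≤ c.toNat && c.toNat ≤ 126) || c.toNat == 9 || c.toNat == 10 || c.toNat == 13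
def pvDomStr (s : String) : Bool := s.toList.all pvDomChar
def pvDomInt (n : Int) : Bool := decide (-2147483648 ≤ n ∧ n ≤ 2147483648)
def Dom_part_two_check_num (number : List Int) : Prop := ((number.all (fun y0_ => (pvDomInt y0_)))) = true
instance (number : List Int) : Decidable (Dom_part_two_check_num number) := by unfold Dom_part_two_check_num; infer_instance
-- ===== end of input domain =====

-- B replaces A's fused scan-and-count while-loop state machine with a run-length encoding pass
-- plus two separate scans (non-decreasing check, run-of-exactly-2 check); objective: idiomatic/alternative.
-- Under Pre_ (length ≥ 6) every index A touches is in range, so xs[i] is modeled by pyGetD with default 0.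

-- ===== PORT A =====
-- inner 'while(i < 5 and number[i] == number[i+1])' loop; fuel is a totality guard only
-- (i increases every step, so fuel 5 is never exhausted from any i).
def ptcInner (number : List Int) (fuel : Nat) (i : Nat) (count : Nat) : Nat × Nat :=
  match fuel with
  | 0 => (count, i)
  | fuel' + 1 =>
    if i < 5 ∧ PySem.List.pyGetD number (i : Int) 0 = PySem.List.pyGetD number ((i : Int) + 1) 0 then
      ptcInner number fuel' (i + 1) (count + 1)
    else (count, i)

-- outer 'while True' loop; fuel 6 is a totality guard only (i increases every iteration and the
-- loop returns once 5 ≤ i).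
def ptcOuter (number : List Int) (fuel : Nat) (i : Nat) (adjacent : Bool) : Bool :=
  match fuel with
  | 0 => adjacent
  | fuel' + 1 =>
    if 5 ≤ i then adjacent
    else if PySem.List.pyGetD number (i : Int) 0 > PySem.List.pyGetD number ((i : Int) + 1) 0 then false
    else
      let p := ptcInner number 5 i 0
      ptcOuter number fuel' (if p.1 = 0 then p.2 + 1 else p.2) (if p.1 = 1 then true else adjacent)

def part_two_check_num (number : List Int) : Bool := ptcOuter number 6 0 false

-- ===== PORT B =====
-- 'if runs and runs[-1][0] == d: runs[-1][1] += 1 else: runs.append([d, 1])'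
def rleStep (runs : List (Int × Int)) (d : Int) : List (Int × Int) :=
  match runs.getLast? with
  | some (v, c) => if v = d then runs.dropLast ++ [(v, c + 1)] else runs ++ [(d, 1)]
  | none => [(d, 1)]

def part_two_check_num_alt (number : List Int) : Bool :=
  let digits := PySem.List.slice number none (some 6)
  let runs := digits.foldl rleStep []
  ((digits.zip (PySem.List.slice digits (some 1) none)).all fun p => p.1 ≤ p.2)
    && (runs.any fun p => p.2 = 2)

-- ===== PRECONDITION & SPEC =====
-- Pre_ excludes exactly the inputs on which A raises IndexError: lists shorter than 6 whose
-- adjacent pairs are all non-decreasing (there A reads past the end of the list).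
def Pre_part_two_check_num (number : List Int) : Prop :=
  6 ≤ number.length ∨ ¬ List.IsChain (· ≤ ·) number
instance (number : List Int) : Decidable (Pre_part_two_check_num number) := by unfold Pre_part_two_check_num; infer_instance
def pvWitness_part_two_check_num : List Int := [1, 1, 2, 3, 4, 5]

def Spec_part_two_check_num (number : List Int) (out : Bool) : Prop := out = part_two_check_num_alt number
instance (number : List Int) (out : Bool) : Decidable (Spec_part_two_check_num number out) := by unfold Spec_part_two_check_num; infer_instance

-- ===== CLAIM (what is proved, stated in full; the proofs are below) =====
def Claim_equal_part_two_check_num : Prop := ∀ (number : List Int), Dom_part_two_check_num number → Pre_part_two_check_num number → Spec_part_two_check_num number (part_two_check_num number)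

-- ===== LEMMAS AND PROOFS =====

-- Both programs look only at the pattern of comparisons between adjacent elements of the first
-- six entries.  We abstract each loop over the list o of the five adjacent Orderings, prove the
-- two abstractions equal by finite enumeration, and bridge each port to its abstraction.

-- abstraction of ptcInner over the orderings
def innO (o : List Ordering) (fuel : Nat) (i : Nat) (count : Nat) : Nat × Nat :=
  match fuel with
  | 0 => (count, i)
  | fuel' + 1 =>
    if i < 5 ∧ o.getD i .eq = .eq then innO o fuel' (i + 1) (count + 1) else (count, i)

-- abstraction of ptcOuter over the orderings
def outO (o : List Ordering) (fuel : Nat) (i : Nat) (adjacent : Bool) : Bool :=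
  match fuel with
  | 0 => adjacent
  | fuel' + 1 =>
    if 5 ≤ i then adjacent
    else if o.getD i .eq = .gt then false
    else
      let p := innO o 5 i 0
      outO o fuel' (if p.1 = 0 then p.2 + 1 else p.2) (if p.1 = 1 then true else adjacent)

-- abstraction of B: non-decreasing = no .gt, and the run lengths from the orderings
def runLensO (o : List Ordering) (n : Nat) : List Nat :=
  match o with
  | [] => [n]
  | x :: t => if x = .eq then runLensO t (n + 1) else n :: runLensO t 1

def fB (o : List Ordering) : Bool :=
  (o.all fun x => x ≠ .gt) && ((runLensO o 1).any fun n => n = 2)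

-- the finite core: the two abstractions agree on every pattern of five orderings
lemma core_eq : ∀ o1 o2 o3 o4 o5 : Ordering,
    outO [o1, o2, o3, o4, o5] 6 0 false = fB [o1, o2, o3, o4, o5] := by decide

-- if some of the five orderings is .gt, the machine answers false (whatever the others are)
lemma core_gt : ∀ o1 o2 o3 o4 o5 : Ordering,
    o1 = .gt ∨ o2 = .gt ∨ o3 = .gt ∨ o4 = .gt ∨ o5 = .gt →
    outO [o1, o2, o3, o4, o5] 6 0 false = false := by decide

lemma inner_bridge (number : List Int) (o : List Ordering)
    (H : ∀ k : Nat, k < 5 → o.getD k .eq =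
      compare (PySem.List.pyGetD number (k : Int) 0) (PySem.List.pyGetD number ((k : Int) + 1) 0)) :
    ∀ fuel i count, ptcInner number fuel i count = innO o fuel i count := by
  intro fuel
  induction fuel with
  | zero => intro i count; rfl
  | succ n ih =>
    intro i count
    simp only [ptcInner, innO]
    by_cases hi : i < 5
    · have hc : (i < 5 ∧ PySem.List.pyGetD number (i : Int) 0 =
          PySem.List.pyGetD number ((i : Int) + 1) 0) ↔ (i < 5 ∧ o.getD i .eq = .eq) := by
        rw [H i hi, compare_eq_iff_eq]
      by_cases h2 : i < 5 ∧ o.getD i .eq = .eq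
      · rw [if_pos (hc.mpr h2), if_pos h2]
        exact ih (i + 1) (count + 1)
      · rw [if_neg (fun h => h2 (hc.mp h)), if_neg h2]
    · rw [if_neg (fun h => hi h.1), if_neg (fun h => hi h.1)]

lemma outer_bridge (number : List Int) (o : List Ordering)
    (H : ∀ k : Nat, k < 5 → o.getD k .eq =
      compare (PySem.List.pyGetD number (k : Int) 0) (PySem.List.pyGetD number ((k : Int) + 1) 0)) :
    ∀ fuel i adjacent, ptcOuter number fuel i adjacent = outO o fuel i adjacent := by
  intro fuel
  induction fuel with
  | zero => intro i adjacent; rfl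
  | succ n ih =>
    intro i adjacent
    simp only [ptcOuter, outO]
    by_cases hi : 5 ≤ i
    · rw [if_pos hi, if_pos hi]
    · rw [if_neg hi, if_neg hi]
      have hlt : i < 5 := by omega
      have hg : (PySem.List.pyGetD number (i : Int) 0 >
          PySem.List.pyGetD number ((i : Int) + 1) 0) ↔ (o.getD i .eq = .gt) := by
        rw [H i hlt, compare_gt_iff_gt]
      by_cases h2 : o.getD i .eq = .gt
      · rw [if_pos (hg.mpr h2), if_pos h2]
      · rw [if_neg (fun h => h2 (hg.mp h)), if_neg h2,
          inner_bridge number o H 5 i 0]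
        exact ih _ _

lemma bridge_A (a b c d e f : Int) (rest : List Int) :
    part_two_check_num (a::b::c::d::e::f::rest) =
      outO [compare a b, compare b c, compare c d, compare d e, compare e f] 6 0 false := by
  refine outer_bridge _ _ (fun k hk => ?_) 6 0 false
  rw [show ((k : Int) + 1) = ((k + 1 : Nat) : Int) by push_cast; ring]
  rw [PySem.List.pyGetD_natCast, PySem.List.pyGetD_natCast]
  interval_cases k <;> rfl

lemma slice6_eq (a b c d e f : Int) (rest : List Int) :
    PySem.List.slice (a::b::c::d::e::f::rest) none (some 6) = [a, b, c, d, e, f] := by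
  simp [pysem]

lemma nondec_eq (a b c d e f : Int) :
    (([a,b,c,d,e,f].zip (PySem.List.slice [a,b,c,d,e,f] (some 1) none)).all fun p => p.1 ≤ p.2) =
      ([compare a b, compare b c, compare c d, compare d e, compare e f].all fun x => x ≠ .gt) := by
  simp only [PySem.List.slice_from_one, List.tail_cons, List.zip_cons_cons, List.zip_nil_right,
    List.all_cons, List.all_nil]
  simp [compare_gt_iff_gt, not_lt]

set_option maxHeartbeats 1000000 in
lemma runs_eq (a b c d e f : Int) :
    (([a,b,c,d,e,f].foldl rleStep []).any fun p => p.2 = 2) =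
      ((runLensO [compare a b, compare b c, compare c d, compare d e, compare e f] 1).any
        fun n => n = 2) := by
  by_cases h1 : a = b <;> by_cases h2 : b = c <;> by_cases h3 : c = d <;>
    by_cases h4 : d = e <;> by_cases h5 : e = f <;>
    (try subst h1) <;> (try subst h2) <;> (try subst h3) <;> (try subst h4) <;> (try subst h5) <;>
    simp [rleStep, runLensO, *]

lemma bridge_B (a b c d e f : Int) (rest : List Int) :
    part_two_check_num_alt (a::b::c::d::e::f::rest) =
      fB [compare a b, compare b c, compare c d, compare d e, compare e f] := by
  simp only [part_two_check_num_alt, fB, slice6_eq]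
  rw [nondec_eq, runs_eq]

-- bridges for the admitted short inputs (a decreasing adjacent pair exists); out-of-range
-- reads, which A never performs on these inputs, are modeled by pyGetD's default 0
lemma bridge_A2 (a b : Int) : part_two_check_num [a, b] =
    outO [compare a b, compare b 0, compare 0 0, compare 0 0, compare 0 0] 6 0 false := by
  refine outer_bridge _ _ (fun k hk => ?_) 6 0 false
  rw [show ((k : Int) + 1) = ((k + 1 : Nat) : Int) by push_cast; ring]
  rw [PySem.List.pyGetD_natCast, PySem.List.pyGetD_natCast]
  interval_cases k <;> rfl

lemma bridge_A3 (a b c : Int) : part_two_check_num [a, b, c] =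
    outO [compare a b, compare b c, compare c 0, compare 0 0, compare 0 0] 6 0 false := by
  refine outer_bridge _ _ (fun k hk => ?_) 6 0 false
  rw [show ((k : Int) + 1) = ((k + 1 : Nat) : Int) by push_cast; ring]
  rw [PySem.List.pyGetD_natCast, PySem.List.pyGetD_natCast]
  interval_cases k <;> rfl

lemma bridge_A4 (a b c d : Int) : part_two_check_num [a, b, c, d] =
    outO [compare a b, compare b c, compare c d, compare d 0, compare 0 0] 6 0 false := by
  refine outer_bridge _ _ (fun k hk => ?_) 6 0 false
  rw [show ((k : Int) + 1) = ((k + 1 : Nat) : Int) by push_cast; ring]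
  rw [PySem.List.pyGetD_natCast, PySem.List.pyGetD_natCast]
  interval_cases k <;> rfl

lemma bridge_A5 (a b c d e : Int) : part_two_check_num [a, b, c, d, e] =
    outO [compare a b, compare b c, compare c d, compare d e, compare e 0] 6 0 false := by
  refine outer_bridge _ _ (fun k hk => ?_) 6 0 false
  rw [show ((k : Int) + 1) = ((k + 1 : Nat) : Int) by push_cast; ring]
  rw [PySem.List.pyGetD_natCast, PySem.List.pyGetD_natCast]
  interval_cases k <;> rfl

-- B rejects any list with a decreasing adjacent pair among its first six elements
lemma alt_false_of_dec (number : List Int) (k : Nat) (hk1 : k + 1 < number.length)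
    (hk6 : k + 1 < 6) (hdec : ¬ number.getD k 0 ≤ number.getD (k + 1) 0) :
    part_two_check_num_alt number = false := by
  simp only [part_two_check_num_alt, PySem.List.slice_from_one,
    show ((6:Int)) = ((6:Nat):Int) from rfl, PySem.List.slice_to_natCast,
    Bool.and_eq_false_iff]
  left
  rw [List.all_eq_false]
  have hlen : k + 1 < (number.take 6).length := by simp [List.length_take]; omega
  refine ⟨((number.take 6)[k]'(by omega), (number.take 6)[k+1]'hlen), ?_, ?_⟩
  · rw [List.mem_iff_getElem]
    refine ⟨k, ?_, ?_⟩
    · simpa [List.length_zip, List.length_tail] using (by omega : k < (number.take 6).length - 1)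
    · rw [List.getElem_zip, List.getElem_tail]
  · simp only [List.getElem_take]
    rw [List.getD_eq_getElem _ _ (by omega), List.getD_eq_getElem _ _ hk1] at hdec
    simpa using hdec

-- ===== VERDICT (by name: the statement is the Claim_ definition above) =====
theorem part_two_check_num_spec : Claim_equal_part_two_check_num := by
  intro number _ hpre
  unfold Spec_part_two_check_num
  unfold Pre_part_two_check_num at hpre
  rcases number with _ | ⟨a, _ | ⟨b, _ | ⟨c, _ | ⟨d, _ | ⟨e, _ | ⟨f, rest⟩⟩⟩⟩⟩⟩
  · rcases hpre with h | h
    · simp at h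
    · exact absurd (by simp) h
  · rcases hpre with h | h
    · simp at h
    · exact absurd (by simp) h
  · rcases hpre with h | h
    · simp at h
    · simp only [List.isChain_cons_cons, List.isChain_singleton, and_true] at h
      rw [bridge_A2, core_gt _ _ _ _ _ (Or.inl (compare_gt_iff_gt.mpr (by omega))),
        alt_false_of_dec [a, b] 0 (by simp) (by omega) (by simpa using h)]
  · rcases hpre with h | h
    · simp at h
    · simp only [List.isChain_cons_cons, List.isChain_singleton, and_true] at h
      by_cases hab : a ≤ b
      · have hbc : ¬ b ≤ c := fun hh => h ⟨hab, hh⟩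
        rw [bridge_A3, core_gt _ _ _ _ _ (Or.inr (Or.inl (compare_gt_iff_gt.mpr (by omega)))),
          alt_false_of_dec [a, b, c] 1 (by simp) (by omega) (by simpa using hbc)]
      · rw [bridge_A3, core_gt _ _ _ _ _ (Or.inl (compare_gt_iff_gt.mpr (by omega))),
          alt_false_of_dec [a, b, c] 0 (by simp) (by omega) (by simpa using hab)]
  · rcases hpre with h | h
    · simp at h
    · simp only [List.isChain_cons_cons, List.isChain_singleton, and_true] at h
      by_cases hab : a ≤ b
      · by_cases hbc : b ≤ c
        · have hcd : ¬ c ≤ d := fun hh => h ⟨hab, hbc, hh⟩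
          rw [bridge_A4,
            core_gt _ _ _ _ _ (Or.inr (Or.inr (Or.inl (compare_gt_iff_gt.mpr (by omega))))),
            alt_false_of_dec [a, b, c, d] 2 (by simp) (by omega) (by simpa using hcd)]
        · rw [bridge_A4, core_gt _ _ _ _ _ (Or.inr (Or.inl (compare_gt_iff_gt.mpr (by omega)))),
            alt_false_of_dec [a, b, c, d] 1 (by simp) (by omega) (by simpa using hbc)]
      · rw [bridge_A4, core_gt _ _ _ _ _ (Or.inl (compare_gt_iff_gt.mpr (by omega))),
          alt_false_of_dec [a, b, c, d] 0 (by simp) (by omega) (by simpa using hab)]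
  · rcases hpre with h | h
    · simp at h
    · simp only [List.isChain_cons_cons, List.isChain_singleton, and_true] at h
      by_cases hab : a ≤ b
      · by_cases hbc : b ≤ c
        · by_cases hcd : c ≤ d
          · have hde : ¬ d ≤ e := fun hh => h ⟨hab, hbc, hcd, hh⟩
            rw [bridge_A5,
              core_gt _ _ _ _ _
                (Or.inr (Or.inr (Or.inr (Or.inl (compare_gt_iff_gt.mpr (by omega)))))),
              alt_false_of_dec [a, b, c, d, e] 3 (by simp) (by omega) (by simpa using hde)]
          · rw [bridge_A5,
              core_gt _ _ _ _ _ (Or.inr (Or.inr (Or.inl (compare_gt_iff_gt.mpr (by omega))))),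
              alt_false_of_dec [a, b, c, d, e] 2 (by simp) (by omega) (by simpa using hcd)]
        · rw [bridge_A5, core_gt _ _ _ _ _ (Or.inr (Or.inl (compare_gt_iff_gt.mpr (by omega)))),
            alt_false_of_dec [a, b, c, d, e] 1 (by simp) (by omega) (by simpa using hbc)]
      · rw [bridge_A5, core_gt _ _ _ _ _ (Or.inl (compare_gt_iff_gt.mpr (by omega))),
          alt_false_of_dec [a, b, c, d, e] 0 (by simp) (by omega) (by simpa using hab)]
  · rw [bridge_A, bridge_B,
      core_eq (compare a b) (compare b c) (compare c d) (compare d e) (compare e f)]
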